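-- pv_equiv track=rewrite | github.com/teejayjan/wordle-solver | solver.py | get_word_no_repeats
-- ===== SOURCE A (Python) =====
-- def get_word_no_repeats(words: list) -> str:
--     """Receives list of tuples of words and frequencies to find
--     best matching word without duplicate letters."""
--     # search for word with no repeated letters
--     for word in words:
--         if len(set(word[0])) == len(word[0]):
--             return word[0].upper()
--
--     # search for word with one repeated letter
--     for word in words:
--         if len(word[0]) - len(set(word[0])) == 1:
--             return word[0].upper()
--
--     # no conditions satisfied, return most likely
--     return words[0][0].upper()
-- ===== SOURCE B (Python) =====
-- def get_word_no_repeats(words: list) -> str: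
--     """Receives list of tuples of words and frequencies to find
--     best matching word without duplicate letters."""
--     one_repeat = None
--     for word in words:
--         w = word[0]
--         distinct = len(set(w))
--         if distinct == len(w):
--             return w.upper()
--         if one_repeat is None and len(w) - distinct == 1:
--             one_repeat = w
--     if one_repeat is not None:
--         return one_repeat.upper()
--     return words[0][0].upper()
-- ===== Notes on version B (the rewrite author's own statement) =====
-- stated objective: faster
-- what changed: Collapses A's two sequential scans into a single pass that records the first one-repeat candidate while searching for a repeat-free word.
import Mathlib
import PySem

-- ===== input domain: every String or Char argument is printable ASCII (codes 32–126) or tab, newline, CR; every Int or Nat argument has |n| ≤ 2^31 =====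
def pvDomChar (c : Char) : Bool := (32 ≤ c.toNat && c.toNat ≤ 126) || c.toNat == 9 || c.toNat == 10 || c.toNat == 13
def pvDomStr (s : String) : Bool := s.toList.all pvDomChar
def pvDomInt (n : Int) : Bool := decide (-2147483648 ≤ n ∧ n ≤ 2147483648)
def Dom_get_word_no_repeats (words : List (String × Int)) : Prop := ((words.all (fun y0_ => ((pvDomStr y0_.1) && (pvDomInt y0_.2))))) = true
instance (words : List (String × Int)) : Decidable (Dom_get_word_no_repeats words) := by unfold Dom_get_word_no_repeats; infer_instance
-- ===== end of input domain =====

-- B collapses A's two sequential scans into one pass carrying the first one-repeat candidate (constant-factor speedup).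


-- ===== PORT A =====
-- first loop: first word with no repeated letters
def aLoop1 : List (String × Int) → Option String
  | [] => none
  | w :: ws =>
    if (PySem.Set.ofList w.1.toList).length = w.1.toList.length then some (PySem.Str.upper w.1)
    else aLoop1 ws

-- second loop: first word with exactly one repeated letter
def aLoop2 : List (String × Int) → Option String
  | [] => none
  | w :: ws =>
    if w.1.toList.length - (PySem.Set.ofList w.1.toList).length = 1 then some (PySem.Str.upper w.1)
    else aLoop2 ws

def get_word_no_repeats (words : List (String × Int)) : String :=
  match aLoop1 words with
  | some s => s
  | none =>
    match aLoop2 words with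
    | some s => s
    | none => PySem.Str.upper (PySem.List.pyGetD words 0 ("", 0)).1   -- words[0]: IndexError on [] is excluded by Pre_

-- ===== PORT B =====
-- single pass carrying the first one-repeat candidate; `orig` kept for the final words[0] fallback
def bLoop : List (String × Int) → Option String → List (String × Int) → String
  | [], one, orig =>
    match one with
    | some w => PySem.Str.upper w
    | none => PySem.Str.upper (PySem.List.pyGetD orig 0 ("", 0)).1
  | w :: ws, one, orig =>
    let d := (PySem.Set.ofList w.1.toList).length
    if d = w.1.toList.length then PySem.Str.upper w.1
    else if one.isNone ∧ w.1.toList.length - d = 1 then bLoop ws (some w.1) orig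
    else bLoop ws one orig

def get_word_no_repeats_alt (words : List (String × Int)) : String :=
  bLoop words none words

-- ===== PRECONDITION & SPEC =====
-- Pre_ excludes the empty list, on which the Python A raises IndexError at words[0].
def Pre_get_word_no_repeats (words : List (String × Int)) : Prop := words ≠ []
instance (words : List (String × Int)) : Decidable (Pre_get_word_no_repeats words) := by unfold Pre_get_word_no_repeats; infer_instance
def pvWitness_get_word_no_repeats : (List (String × Int)) := [("ab", 1)]

def Spec_get_word_no_repeats (words : List (String × Int)) (out : String) : Prop := out = get_word_no_repeats_alt words
instance (words : List (String × Int)) (out : String) : Decidable (Spec_get_word_no_repeats words out) := by unfold Spec_get_word_no_repeats; infer_instance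

-- ===== CLAIM (what is proved, stated in full; the proofs are below) =====
def Claim_equal_get_word_no_repeats : Prop := ∀ (words : List (String × Int)), Dom_get_word_no_repeats words → Pre_get_word_no_repeats words → Spec_get_word_no_repeats words (get_word_no_repeats words)

-- ===== LEMMAS AND PROOFS =====

-- B's loop, characterised by A's two loops: an early repeat-free hit wins; otherwise the carried
-- candidate (if any) beats the remaining scan; otherwise A's second loop, then the fallback.
theorem bLoop_eq (ws : List (String × Int)) (one : Option String) (orig : List (String × Int)) :
    bLoop ws one orig =
      match aLoop1 ws with
      | some s => s
      | none =>
        match one with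
        | some w => PySem.Str.upper w
        | none =>
          match aLoop2 ws with
          | some s => s
          | none => PySem.Str.upper (PySem.List.pyGetD orig 0 ("", 0)).1 := by
  induction ws generalizing one with
  | nil => cases one <;> simp [bLoop, aLoop1, aLoop2]
  | cons w ws ih =>
    by_cases h1 : (PySem.Set.ofList w.1.toList).length = w.1.toList.length
    · simp [bLoop, aLoop1, h1]
    · simp only [String.length_toList] at h1
      cases one with
      | some w0 =>
        have : (some w0).isNone = false := rfl
        simp [bLoop, aLoop1, h1, this, ih]
      | none =>
        by_cases h2 : w.1.length - (PySem.Set.ofList w.1.toList).length = 1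
        · simp [bLoop, aLoop1, aLoop2, h1, h2, ih]
        · simp [bLoop, aLoop1, aLoop2, h1, h2, ih]

-- ===== VERDICT (by name: the statement is the Claim_ definition above) =====
theorem get_word_no_repeats_spec : Claim_equal_get_word_no_repeats := by
  intro words _ _
  unfold Spec_get_word_no_repeats get_word_no_repeats get_word_no_repeats_alt
  rw [bLoop_eq]
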